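-- pv_equiv track=rewrite | github.com/Tetrix/Aalto-assignments | algorithmic_methods_of_data_mining/exercise2/minhash.py | get_union
-- ===== SOURCE A (Python) =====
-- import operator
--
-- def get_union(bigger, smaller):
--     union = {}
--     for item in bigger:
--         elem = [elem for elem in smaller if elem[0] == item[0]]
--         if len(elem) != 0:
--            union[item[0]] = max(elem[0][1], item[1])
--         else:
--             union[item[0]] = item[1]
--     union = sorted(union.items(), key=operator.itemgetter(0))
--     return union
-- ===== SOURCE B (Python) =====
-- def _first_per_key(pairs):
--     # pairs is (stably) sorted by key: keep the first element of each equal-key run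
--     out = []
--     for p in pairs:
--         if not (out and out[-1][0] == p[0]):
--             out.append(p)
--     return out
--
--
-- def _last_per_key(pairs):
--     # pairs is (stably) sorted by key: keep the last element of each equal-key run
--     return list(reversed(_first_per_key(list(reversed(pairs)))))
--
--
-- def get_union(bigger, smaller):
--     # sort both sides once, collapse equal-key runs, then merge with two pointers
--     bb = _last_per_key(sorted(bigger, key=lambda kv: kv[0]))
--     ss = _first_per_key(sorted(smaller, key=lambda kv: kv[0]))
--     out = []
--     j = 0
--     for k, v in bb:
--         while j < len(ss) and ss[j][0] < k:
--             j += 1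
--         if j < len(ss) and ss[j][0] == k:
--             out.append((k, max(ss[j][1], v)))
--         else:
--             out.append((k, v))
--     return out
-- ===== Notes on version B (the rewrite author's own statement) =====
-- stated objective: faster
-- what changed: B replaces A's dict-building loop with a per-item linear scan of smaller by a sort-based algorithm: sort both lists by key, collapse equal-key runs (last occurrence wins in bigger, first in smaller), then combine them with a single two-pointer merge over the two sorted lists; no dictionary is built and the output comes out already sorted.
import Mathlib
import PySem

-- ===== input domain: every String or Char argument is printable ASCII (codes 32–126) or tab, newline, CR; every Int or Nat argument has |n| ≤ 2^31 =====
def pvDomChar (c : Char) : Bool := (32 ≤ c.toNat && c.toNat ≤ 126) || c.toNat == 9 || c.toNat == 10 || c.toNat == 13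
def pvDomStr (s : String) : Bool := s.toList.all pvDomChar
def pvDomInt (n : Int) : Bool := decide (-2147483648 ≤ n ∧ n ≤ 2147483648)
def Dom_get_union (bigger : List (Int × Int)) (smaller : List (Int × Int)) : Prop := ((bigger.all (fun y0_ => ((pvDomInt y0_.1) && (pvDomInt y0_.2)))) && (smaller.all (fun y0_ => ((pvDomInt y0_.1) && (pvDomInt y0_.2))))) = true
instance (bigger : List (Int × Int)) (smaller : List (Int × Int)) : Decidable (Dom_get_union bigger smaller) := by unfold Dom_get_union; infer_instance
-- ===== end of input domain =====

-- B replaces A's quadratic dict-building (linear scan of `smaller` per item) by sort both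
-- lists, collapse equal-key runs, and one two-pointer merge (measured faster, asymptotically).

-- ===== PORT A =====
def get_union (bigger : List (Int × Int)) (smaller : List (Int × Int)) : List (Int × Int) :=
  let union : PySem.Dict Int Int := bigger.foldl (fun u item =>
    let elem := smaller.filter (fun e => e.1 == item.1)
    if elem.length ≠ 0 then
      u.insert item.1 (max (elem.headD (0, 0)).2 item.2)
    else
      u.insert item.1 item.2) PySem.Dict.empty
  PySem.List.sorted union.items (fun kv => kv.1) false

-- ===== PORT B =====
-- first_per_key: out only grows by append; the Python test `out and out[-1][0] == p[0]`
def pvFirstPerKey (pairs : List (Int × Int)) : List (Int × Int) :=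
  pairs.foldl (fun out p =>
    match out.getLast? with
    | some q => if q.1 == p.1 then out else out ++ [p]
    | none => out ++ [p]) []

def pvLastPerKey (pairs : List (Int × Int)) : List (Int × Int) :=
  (pvFirstPerKey pairs.reverse).reverse

-- the merge loop: the `while` advancing j is the dropWhile on the remaining suffix of ss
def pvMergeMax : List (Int × Int) → List (Int × Int) → List (Int × Int)
  | [], _ => []
  | (k, v) :: bb, ss =>
    let ss' := ss.dropWhile (fun p => decide (p.1 < k))
    match ss' with
    | q :: _ =>
      if q.1 == k then (k, max q.2 v) :: pvMergeMax bb ss'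
      else (k, v) :: pvMergeMax bb ss'
    | [] => (k, v) :: pvMergeMax bb ss'

def get_union_alt (bigger : List (Int × Int)) (smaller : List (Int × Int)) : List (Int × Int) :=
  let bb := pvLastPerKey (PySem.List.sorted bigger (fun kv => kv.1) false)
  let ss := pvFirstPerKey (PySem.List.sorted smaller (fun kv => kv.1) false)
  pvMergeMax bb ss

-- ===== PRECONDITION & SPEC =====
def Spec_get_union (bigger : List (Int × Int)) (smaller : List (Int × Int)) (out : List (Int × Int)) : Prop := out = get_union_alt bigger smaller
instance (bigger : List (Int × Int)) (smaller : List (Int × Int)) (out : List (Int × Int)) : Decidable (Spec_get_union bigger smaller out) := by unfold Spec_get_union; infer_instance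

-- ===== CLAIM (what is proved, stated in full; the proofs are below) =====
def Claim_equal_get_union : Prop := ∀ (bigger : List (Int × Int)) (smaller : List (Int × Int)), Dom_get_union bigger smaller → Spec_get_union bigger smaller (get_union bigger smaller)

-- ===== LEMMAS AND PROOFS =====

-- recursion form of pvFirstPerKey: prev is the key of the last kept element
def fpkRec : Option Int → List (Int × Int) → List (Int × Int)
  | _, [] => []
  | prev, p :: rest => if prev = some p.1 then fpkRec prev rest else p :: fpkRec (some p.1) rest

-- the per-key value A stores in the dict
def aval (smaller : List (Int × Int)) (p : Int × Int) : Int :=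
  if (smaller.filter (fun e => e.1 == p.1)).length ≠ 0 then
    max ((smaller.filter (fun e => e.1 == p.1)).headD (0, 0)).2 p.2
  else p.2

-- A's dict in clean insert form
def UD (bigger smaller : List (Int × Int)) : PySem.Dict Int Int :=
  bigger.foldl (fun u item => u.insert item.1 (aval smaller item)) PySem.Dict.empty

-- B's merge as a map over bb
def gB (smaller : List (Int × Int)) (p : Int × Int) : Int × Int :=
  match (pvFirstPerKey (PySem.List.sorted smaller (fun kv => kv.1) false)).find? (fun q => q.1 == p.1) with
  | some q => (p.1, max q.2 p.2)
  | none => p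

theorem fpk_foldl (l : List (Int × Int)) : ∀ out : List (Int × Int),
    l.foldl (fun out p =>
      match out.getLast? with
      | some q => if q.1 == p.1 then out else out ++ [p]
      | none => out ++ [p]) out
    = out ++ fpkRec (out.getLast?.map (·.1)) l := by
  induction l with
  | nil => intro out; simp [fpkRec]
  | cons p rest ih =>
    intro out
    cases h : out.getLast? with
    | none =>
      have hout : out = [] := List.getLast?_eq_none_iff.mp h
      subst hout
      simp only [List.foldl_cons]
      rw [ih]
      simp [fpkRec]
    | some q =>
      simp only [List.foldl_cons]
      rw [ih]
      by_cases hq : q.1 == p.1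
      · have hq' : q.1 = p.1 := by simpa using hq
        simp [h, fpkRec, hq']
      · have hq' : q.1 ≠ p.1 := by simpa using hq
        simp [h, hq, fpkRec, hq']

theorem firstPerKey_eq (l : List (Int × Int)) : pvFirstPerKey l = fpkRec none l := by
  unfold pvFirstPerKey
  rw [fpk_foldl]
  simp


theorem fpk_sublist : ∀ (l : List (Int × Int)) (prev : Option Int), (fpkRec prev l).Sublist l := by
  intro l
  induction l with
  | nil => intro prev; simp [fpkRec]
  | cons p rest ih =>
    intro prev
    by_cases h : prev = some p.1
    · simpa [fpkRec, h] using (ih prev).trans (List.sublist_cons_self p rest)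
    · simpa [fpkRec, h] using List.Sublist.cons₂ p (ih (some p.1))


theorem sl_run (le : Int → Int → Prop) (hanti : ∀ a b, le a b → le b a → a = b) (c : Int) :
    ∀ l : List (Int × Int), l.Pairwise (fun a b => le a.1 b.1) → (∀ q ∈ l, le c q.1) →
    ∀ q ∈ l.dropWhile (fun p => p.1 == c), q.1 ≠ c := by
  intro l
  induction l with
  | nil => simp
  | cons r rest ih =>
    intro hpw hall
    by_cases hr : r.1 == c
    · rw [List.dropWhile_cons_of_pos (by simpa using hr)]
      exact ih hpw.of_cons (fun q hq => hall q (List.mem_cons_of_mem r hq))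
    · rw [List.dropWhile_cons_of_neg (by simpa using hr)]
      intro q hq
      rcases List.mem_cons.mp hq with h1 | h2
      · subst h1; simpa using hr
      · intro hqc
        have h1 : le r.1 q.1 := (List.pairwise_cons.mp hpw).1 q h2
        have h2' : le c r.1 := hall r List.mem_cons_self
        rw [hqc] at h1
        exact (by simpa using hr : r.1 ≠ c) (hanti r.1 c h1 h2')


theorem fpk_ne_prev (c : Int) : ∀ l : List (Int × Int),
    (∀ q ∈ l.dropWhile (fun p => p.1 == c), q.1 ≠ c) →
    ∀ q ∈ fpkRec (some c) l, q.1 ≠ c := by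
  intro l
  induction l with
  | nil => simp [fpkRec]
  | cons p rest ih =>
    intro hdrop
    by_cases hp : p.1 = c
    · have hskip : (some c : Option Int) = some p.1 := by rw [hp]
      rw [show fpkRec (some c) (p :: rest) = fpkRec (some c) rest from by simp [fpkRec, hskip]]
      refine ih ?_
      have hd : (p :: rest).dropWhile (fun p => p.1 == c) = rest.dropWhile (fun p => p.1 == c) :=
        List.dropWhile_cons_of_pos (by simpa using hp)
      rw [hd] at hdrop
      exact hdrop
    · have hkeep : (some c : Option Int) ≠ some p.1 := by simpa using fun h => hp h.symm
      rw [show fpkRec (some c) (p :: rest) = p :: fpkRec (some p.1) rest from by simp [fpkRec, hkeep]]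
      have hd : (p :: rest).dropWhile (fun p => p.1 == c) = p :: rest :=
        List.dropWhile_cons_of_neg (by simpa using hp)
      rw [hd] at hdrop
      intro q hq
      rcases List.mem_cons.mp hq with h1 | h2
      · subst h1; exact hp
      · exact hdrop q (List.mem_cons_of_mem p ((fpk_sublist rest (some p.1)).mem h2))


theorem fpk_find (le : Int → Int → Prop) (hanti : ∀ a b, le a b → le b a → a = b) :
    ∀ (l : List (Int × Int)) (prev : Option Int),
    l.Pairwise (fun a b => le a.1 b.1) →
    (∀ c0, prev = some c0 → ∀ q ∈ l.dropWhile (fun p => p.1 == c0), q.1 ≠ c0) →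
    ∀ c, (fpkRec prev l).find? (fun p => p.1 == c)
        = if prev = some c then none else l.find? (fun p => p.1 == c) := by
  intro l
  induction l with
  | nil => intro prev hpw hprev c; simp [fpkRec]
  | cons p rest ih =>
    intro prev hpw hprev c
    by_cases hskip : prev = some p.1
    · rw [show fpkRec prev (p :: rest) = fpkRec prev rest from by simp [fpkRec, hskip]]
      have hprev' : ∀ c0, prev = some c0 → ∀ q ∈ rest.dropWhile (fun r => r.1 == c0), q.1 ≠ c0 := by
        intro c0 hc0 q hq
        have hc0' : p.1 = c0 := by rw [hskip] at hc0; exact Option.some_injective _ hc0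
        have hd : (p :: rest).dropWhile (fun r => r.1 == c0) = rest.dropWhile (fun r => r.1 == c0) :=
          List.dropWhile_cons_of_pos (by simp [hc0'])
        exact hprev c0 hc0 q (by rw [hd]; exact hq)
      rw [ih prev hpw.of_cons hprev' c]
      by_cases hc : prev = some c
      · simp [hc]
      · rw [if_neg hc, if_neg hc]
        have hpc : (p.1 == c) = false := by
          refine beq_eq_false_iff_ne.mpr ?_
          intro h; exact hc (by rw [hskip, h])
        rw [List.find?_cons_of_neg (p := fun r : Int × Int => r.1 == c) (by simp [hpc])]
    · rw [show fpkRec prev (p :: rest) = p :: fpkRec (some p.1) rest from by simp [fpkRec, hskip]]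
      have hrun : ∀ q ∈ rest.dropWhile (fun r => r.1 == p.1), q.1 ≠ p.1 :=
        sl_run le hanti p.1 rest hpw.of_cons (fun q hq => (List.pairwise_cons.mp hpw).1 q hq)
      have hprev' : ∀ c0, (some p.1 : Option Int) = some c0 → ∀ q ∈ rest.dropWhile (fun r => r.1 == c0), q.1 ≠ c0 := by
        intro c0 hc0
        have hc0' : c0 = p.1 := (Option.some_injective _ hc0).symm
        subst hc0'
        exact hrun
      by_cases hpc : p.1 == c
      · have hpc' : p.1 = c := by simpa using hpc
        have hprevc : prev ≠ some c := by rw [← hpc']; exact hskip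
        rw [if_neg hprevc]
        rw [List.find?_cons_of_pos (p := fun r : Int × Int => r.1 == c) hpc]
        rw [List.find?_cons_of_pos (p := fun r : Int × Int => r.1 == c) hpc]
      · rw [List.find?_cons_of_neg (p := fun r : Int × Int => r.1 == c) hpc]
        rw [List.find?_cons_of_neg (p := fun r : Int × Int => r.1 == c) hpc]
        rw [ih (some p.1) hpw.of_cons hprev' c]
        have hne : (some p.1 : Option Int) ≠ some c := by simpa using (by simpa using hpc : p.1 ≠ c)
        rw [if_neg hne]
        by_cases hc : prev = some c
        · rw [if_pos hc]
          obtain ⟨c0, hc0⟩ : ∃ c0, prev = some c0 := ⟨c, hc⟩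
          have hcc : c0 = c := by rw [hc] at hc0; exact (Option.some_injective _ hc0).symm
          subst hcc
          have hall := hprev c0 hc
          have hd : (p :: rest).dropWhile (fun r => r.1 == c0) = p :: rest := by
            refine List.dropWhile_cons_of_neg ?_
            simpa using (by simpa using hpc : p.1 ≠ c0)
          rw [hd] at hall
          rw [List.find?_eq_none]
          intro q hq
          have := hall q (List.mem_cons_of_mem p hq)
          simpa using this
        · rw [if_neg hc]


theorem fpk_pairwise (le : Int → Int → Prop) (hanti : ∀ a b, le a b → le b a → a = b) :
    ∀ (l : List (Int × Int)) (prev : Option Int),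
    l.Pairwise (fun a b => le a.1 b.1) →
    (fpkRec prev l).Pairwise (fun a b => le a.1 b.1 ∧ a.1 ≠ b.1) := by
  intro l
  induction l with
  | nil => intro prev hpw; simp [fpkRec]
  | cons p rest ih =>
    intro prev hpw
    by_cases hskip : prev = some p.1
    · rw [show fpkRec prev (p :: rest) = fpkRec prev rest from by simp [fpkRec, hskip]]
      exact ih prev hpw.of_cons
    · rw [show fpkRec prev (p :: rest) = p :: fpkRec (some p.1) rest from by simp [fpkRec, hskip]]
      refine List.pairwise_cons.mpr ⟨?_, ih (some p.1) hpw.of_cons⟩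
      intro q hq
      have hqrest : q ∈ rest := (fpk_sublist rest (some p.1)).mem hq
      have hle : le p.1 q.1 := (List.pairwise_cons.mp hpw).1 q hqrest
      have hrun : ∀ r ∈ rest.dropWhile (fun r => r.1 == p.1), r.1 ≠ p.1 :=
        sl_run le hanti p.1 rest hpw.of_cons (fun r hr => (List.pairwise_cons.mp hpw).1 r hr)
      have hne : q.1 ≠ p.1 := fpk_ne_prev p.1 rest hrun q hq
      exact ⟨hle, fun h => hne h.symm⟩


theorem mem_iff_find? : ∀ l : List (Int × Int), l.Pairwise (fun a b => a.1 ≠ b.1) →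
    ∀ p : Int × Int, p ∈ l ↔ l.find? (fun q => q.1 == p.1) = some p := by
  intro l
  induction l with
  | nil => simp
  | cons q t ih =>
    intro hpw p
    by_cases hq : q.1 == p.1
    · rw [List.find?_cons_of_pos (p := fun r : Int × Int => r.1 == p.1) hq]
      constructor
      · intro hp
        rcases List.mem_cons.mp hp with h1 | h2
        · rw [h1]
        · exact absurd (by simpa using hq) ((List.pairwise_cons.mp hpw).1 p h2)
      · intro hp
        rw [show p = q from (Option.some_injective _ hp).symm]
        exact List.mem_cons_self
    · rw [List.find?_cons_of_neg (p := fun r : Int × Int => r.1 == p.1) hq]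
      constructor
      · intro hp
        rcases List.mem_cons.mp hp with h1 | h2
        · subst h1; simp at hq
        · exact (ih hpw.of_cons p).mp h2
      · intro hp
        exact List.mem_cons_of_mem q ((ih hpw.of_cons p).mpr hp)


-- stability of PySem sort: filtering one key commutes with sorting
theorem insertBy_filter (x : Int × Int) (c : Int) :
    ∀ acc : List (Int × Int), acc.Pairwise (fun a b => a.1 ≤ b.1) →
    (PySem.List.insertBy (fun a b => decide (a.1 < b.1)) x acc).filter (fun p => p.1 == c)
    = if x.1 == c then acc.filter (fun p => p.1 == c) ++ [x] else acc.filter (fun p => p.1 == c) := by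
  intro acc
  induction acc with
  | nil =>
    intro _
    by_cases hx : x.1 == c <;> simp [PySem.List.insertBy, List.filter, hx]
  | cons y ys ih =>
    intro hpw
    by_cases hlt : x.1 < y.1
    · rw [show PySem.List.insertBy (fun a b => decide (a.1 < b.1)) x (y :: ys) = x :: y :: ys from by
        simp [PySem.List.insertBy, hlt]]
      by_cases hx : x.1 == c
      · have hx' : x.1 = c := by simpa using hx
        have hnil : (y :: ys).filter (fun p => p.1 == c) = [] := by
          rw [List.filter_eq_nil_iff]
          intro q hq
          have hyq : y.1 ≤ q.1 := by
            rcases List.mem_cons.mp hq with h1 | h2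
            · rw [h1]
            · exact (List.pairwise_cons.mp hpw).1 q h2
          simp only [beq_iff_eq]
          omega
        rw [List.filter_cons_of_pos (p := fun r : Int × Int => r.1 == c) hx, hnil, if_pos hx]
        simp
      · rw [List.filter_cons_of_neg (p := fun r : Int × Int => r.1 == c) hx, if_neg hx]
    · rw [show PySem.List.insertBy (fun a b => decide (a.1 < b.1)) x (y :: ys)
          = y :: PySem.List.insertBy (fun a b => decide (a.1 < b.1)) x ys from by
        simp [PySem.List.insertBy, hlt]]
      simp only [List.filter_cons, ih hpw.of_cons]
      by_cases hy : (y.1 == c) <;> by_cases hx : (x.1 == c) <;> simp [hy, hx]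


theorem sorted_filter (xs : List (Int × Int)) (c : Int) :
    (PySem.List.sorted xs (fun kv => kv.1) false).filter (fun p => p.1 == c)
    = xs.filter (fun p => p.1 == c) := by
  induction xs using List.reverseRecOn with
  | nil => rfl
  | append_singleton l x ih =>
    rw [PySem.List.sorted_eq_foldl_insertBy, List.foldl_append, List.foldl_cons, List.foldl_nil,
      ← PySem.List.sorted_eq_foldl_insertBy]
    rw [insertBy_filter x c _ (PySem.List.sorted_pairwise l (fun kv => kv.1))]
    rw [ih, List.filter_append]
    by_cases hx : x.1 == c <;> simp [List.filter, hx]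


theorem find?_dropWhile (k c : Int) (h : k ≤ c) : ∀ ss : List (Int × Int),
    ss.find? (fun q => q.1 == c) = (ss.dropWhile (fun q => decide (q.1 < k))).find? (fun q => q.1 == c) := by
  intro ss
  induction ss with
  | nil => simp
  | cons q t ih =>
    by_cases hq : q.1 < k
    · rw [List.dropWhile_cons_of_pos (by simpa using hq)]
      have hne : (q.1 == c) = false := by
        simp only [beq_eq_false_iff_ne]; omega
      rw [List.find?_cons_of_neg (by simp [hne]), ih]
    · rw [List.dropWhile_cons_of_neg (by simpa using hq)]


theorem find?_none_of_lt (c : Int) (l : List (Int × Int)) (h : ∀ q ∈ l, c < q.1) :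
    l.find? (fun q => q.1 == c) = none := by
  rw [List.find?_eq_none]
  intro q hq
  have := h q hq
  simp only [beq_iff_eq]
  omega

theorem dropWhile_head_false (l : List (Int × Int)) (p : Int × Int → Bool) (q : Int × Int)
    (t : List (Int × Int)) (h : l.dropWhile p = q :: t) : p q = false := by
  induction l with
  | nil => simp at h
  | cons r rest ih =>
    by_cases hr : p r
    · rw [List.dropWhile_cons_of_pos hr] at h
      exact ih h
    · rw [List.dropWhile_cons_of_neg hr] at h
      rw [← (List.cons.injEq _ _ _ _ |>.mp h).1]
      simpa using hr

theorem mergeMax_eq_map : ∀ (bb ss : List (Int × Int)),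
    bb.Pairwise (fun a b => a.1 < b.1) → ss.Pairwise (fun a b => a.1 ≤ b.1) →
    pvMergeMax bb ss = bb.map (fun p =>
      match ss.find? (fun q => q.1 == p.1) with
      | some q => (p.1, max q.2 p.2)
      | none => p) := by
  intro bb
  induction bb with
  | nil => intro ss _ _; simp [pvMergeMax]
  | cons pv bb ih =>
    intro ss hbb hss
    obtain ⟨k, v⟩ := pv
    have hss' : (ss.dropWhile (fun p => decide (p.1 < k))).Pairwise (fun a b => a.1 ≤ b.1) :=
      List.Pairwise.sublist (List.dropWhile_sublist _) hss
    have hkey : ∀ p ∈ bb, k < p.1 := (List.pairwise_cons.mp hbb).1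
    have hfind : ∀ c, k ≤ c → ss.find? (fun q => q.1 == c)
        = (ss.dropWhile (fun p => decide (p.1 < k))).find? (fun q => q.1 == c) :=
      fun c hc => find?_dropWhile k c hc ss
    have htail : pvMergeMax bb (ss.dropWhile (fun p => decide (p.1 < k)))
        = bb.map (fun p =>
            match ss.find? (fun q => q.1 == p.1) with
            | some q => (p.1, max q.2 p.2)
            | none => p) := by
      rw [ih _ hbb.of_cons hss']
      exact List.map_congr_left (fun p hp => by
        rw [← hfind p.1 (le_of_lt (hkey p hp))])
    have hstep : pvMergeMax ((k, v) :: bb) ss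
        = (match ss.dropWhile (fun p => decide (p.1 < k)) with
          | q :: _ =>
            if q.1 == k then (k, max q.2 v) :: pvMergeMax bb (ss.dropWhile (fun p => decide (p.1 < k)))
            else (k, v) :: pvMergeMax bb (ss.dropWhile (fun p => decide (p.1 < k)))
          | [] => (k, v) :: pvMergeMax bb (ss.dropWhile (fun p => decide (p.1 < k)))) := rfl
    cases hcase : ss.dropWhile (fun p => decide (p.1 < k)) with
    | nil =>
      have hz : ss.find? (fun q => q.1 == k) = none := by
        rw [hfind k le_rfl, hcase]; rfl
      have hstep2 : pvMergeMax ((k, v) :: bb) ss = (k, v) :: pvMergeMax bb [] := by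
        rw [hstep, hcase]
      rw [hcase] at htail
      rw [hstep2, htail, List.map_cons]
      simp [hz]
    | cons q t =>
      have hqf : (decide (q.1 < k)) = false := dropWhile_head_false ss _ q t hcase
      have hqk : ¬ q.1 < k := by simpa using hqf
      by_cases hq : q.1 == k
      · have hfq : ss.find? (fun r => r.1 == k) = some q := by
          rw [hfind k le_rfl, hcase]
          exact List.find?_cons_of_pos (p := fun r : Int × Int => r.1 == k) hq
        have hstep2 : pvMergeMax ((k, v) :: bb) ss
            = if q.1 == k then (k, max q.2 v) :: pvMergeMax bb (q :: t)
              else (k, v) :: pvMergeMax bb (q :: t) := by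
          rw [hstep, hcase]
        rw [hcase] at htail
        rw [hstep2, if_pos hq, htail, List.map_cons]
        simp [hfq]
      · have hqk' : k < q.1 := lt_of_le_of_ne (le_of_not_gt hqk) (fun h => (by simpa using hq : q.1 ≠ k) h.symm)
        have hfq : ss.find? (fun r => r.1 == k) = none := by
          rw [hfind k le_rfl, hcase]
          refine find?_none_of_lt k (q :: t) ?_
          intro r hr
          rcases List.mem_cons.mp hr with h1 | h2
          · rw [h1]; exact hqk'
          · have : q.1 ≤ r.1 := by
              rw [hcase] at hss'
              exact (List.pairwise_cons.mp hss').1 r h2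
            omega
        have hstep2 : pvMergeMax ((k, v) :: bb) ss
            = if q.1 == k then (k, max q.2 v) :: pvMergeMax bb (q :: t)
              else (k, v) :: pvMergeMax bb (q :: t) := by
          rw [hstep, hcase]
        rw [hcase] at htail
        rw [hstep2, if_neg hq, htail, List.map_cons]
        simp [hfq]


theorem UD_get? (bigger smaller : List (Int × Int)) (k : Int) :
    (UD bigger smaller).get? k
    = ((bigger.filter (fun p => p.1 == k)).getLast?).map (aval smaller) := by
  unfold UD
  induction bigger using List.reverseRecOn with
  | nil => simp
  | append_singleton l p ih =>
    rw [List.foldl_append, List.foldl_cons, List.foldl_nil]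
    rw [PySem.Dict.get?_insert]
    by_cases hk : k = p.1
    · rw [if_pos hk]
      rw [List.filter_append]
      have hpk : (p.1 == k) = true := by simp [hk]
      simp [hpk]
    · rw [if_neg hk, ih, List.filter_append]
      have hpk : (p.1 == k) = false := beq_eq_false_iff_ne.mpr (fun h => hk h.symm)
      simp [hpk]


theorem get_union_eq_sorted_UD (bigger smaller : List (Int × Int)) :
    get_union bigger smaller = PySem.List.sorted (UD bigger smaller).items (fun kv => kv.1) false := by
  unfold get_union UD
  have hf : (fun (u : PySem.Dict Int Int) (item : Int × Int) =>
      let elem := smaller.filter (fun e => e.1 == item.1)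
      if elem.length ≠ 0 then u.insert item.1 (max (elem.headD (0, 0)).2 item.2)
      else u.insert item.1 item.2)
      = (fun (u : PySem.Dict Int Int) (item : Int × Int) => u.insert item.1 (aval smaller item)) := by
    funext u item
    show (if (smaller.filter (fun e => e.1 == item.1)).length ≠ 0 then
        u.insert item.1 (max ((smaller.filter (fun e => e.1 == item.1)).headD (0, 0)).2 item.2)
      else u.insert item.1 item.2)
      = u.insert item.1 (aval smaller item)
    rw [← apply_ite (u.insert item.1)]
    rfl
  rw [hf]


theorem gB_eq (smaller : List (Int × Int)) (p : Int × Int) :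
    gB smaller p = (p.1, aval smaller p) := by
  unfold gB
  have hfind : (pvFirstPerKey (PySem.List.sorted smaller (fun kv => kv.1) false)).find? (fun q => q.1 == p.1)
      = (smaller.filter (fun q => q.1 == p.1)).head? := by
    rw [firstPerKey_eq]
    rw [fpk_find (fun a b => a ≤ b) (fun a b h1 h2 => le_antisymm h1 h2) _ none
      (PySem.List.sorted_pairwise smaller (fun kv => kv.1)) (by simp) p.1]
    rw [if_neg (by simp)]
    rw [← List.head?_filter]
    rw [sorted_filter smaller p.1]
  rw [hfind]
  unfold aval
  cases h : (smaller.filter (fun q => q.1 == p.1)).head? with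
  | none =>
    have hnil : smaller.filter (fun q => q.1 == p.1) = [] := List.head?_eq_none_iff.mp h
    simp [hnil]
  | some e =>
    have hne : (smaller.filter (fun q => q.1 == p.1)).length ≠ 0 := by
      intro hlen
      rw [List.length_eq_zero_iff.mp hlen] at h
      simp at h
    simp [hne, List.headD_eq_head?_getD, h]


theorem mem_bb (bigger : List (Int × Int)) (p : Int × Int) :
    p ∈ pvLastPerKey (PySem.List.sorted bigger (fun kv => kv.1) false)
    ↔ (bigger.filter (fun q => q.1 == p.1)).getLast? = some p := by
  unfold pvLastPerKey
  rw [firstPerKey_eq]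
  have hbpw : (PySem.List.sorted bigger (fun kv => kv.1) false).reverse.Pairwise
      (fun a b : Int × Int => b.1 ≤ a.1) :=
    List.pairwise_reverse.mpr (PySem.List.sorted_pairwise bigger (fun kv => kv.1))
  have hanti : ∀ a b : Int, b ≤ a → a ≤ b → a = b := fun a b h1 h2 => le_antisymm h2 h1
  have hFpw := fpk_pairwise (fun x y => y ≤ x) hanti
    (PySem.List.sorted bigger (fun kv => kv.1) false).reverse none hbpw
  have hFne : (fpkRec none (PySem.List.sorted bigger (fun kv => kv.1) false).reverse).Pairwise
      (fun a b : Int × Int => a.1 ≠ b.1) := hFpw.imp (fun h => h.2)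
  rw [List.mem_reverse]
  rw [mem_iff_find? _ hFne p]
  rw [fpk_find (fun x y => y ≤ x) hanti _ none hbpw (by simp) p.1]
  rw [if_neg (by simp)]
  rw [← List.head?_filter, List.filter_reverse, List.head?_reverse]
  rw [sorted_filter bigger p.1]


theorem bb_pairwise_lt (bigger : List (Int × Int)) :
    (pvLastPerKey (PySem.List.sorted bigger (fun kv => kv.1) false)).Pairwise (fun a b => a.1 < b.1) := by
  unfold pvLastPerKey
  rw [firstPerKey_eq]
  have hbpw : (PySem.List.sorted bigger (fun kv => kv.1) false).reverse.Pairwise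
      (fun a b : Int × Int => b.1 ≤ a.1) :=
    List.pairwise_reverse.mpr (PySem.List.sorted_pairwise bigger (fun kv => kv.1))
  have hanti : ∀ a b : Int, b ≤ a → a ≤ b → a = b := fun a b h1 h2 => le_antisymm h2 h1
  have hFpw := fpk_pairwise (fun x y => y ≤ x) hanti
    (PySem.List.sorted bigger (fun kv => kv.1) false).reverse none hbpw
  rw [List.pairwise_reverse]
  exact hFpw.imp (fun h => lt_of_le_of_ne h.1 (fun e => h.2 e.symm))


theorem main_eq (bigger smaller : List (Int × Int)) :
    get_union bigger smaller = get_union_alt bigger smaller := by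
  rw [get_union_eq_sorted_UD]
  have hss : (pvFirstPerKey (PySem.List.sorted smaller (fun kv => kv.1) false)).Pairwise
      (fun a b : Int × Int => a.1 ≤ b.1) := by
    rw [firstPerKey_eq]
    exact List.Pairwise.sublist (fpk_sublist _ none) (PySem.List.sorted_pairwise smaller (fun kv => kv.1))
  have hBeq : get_union_alt bigger smaller
      = (pvLastPerKey (PySem.List.sorted bigger (fun kv => kv.1) false)).map (gB smaller) :=
    mergeMax_eq_map _ _ (bb_pairwise_lt bigger) hss
  rw [hBeq]
  have hnodupKeys : (UD bigger smaller).keys.Nodup :=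
    PySem.Dict.nodup_keys_foldl_insert_key bigger (fun p : Int × Int => p.1)
      (fun u item => aval smaller item) PySem.Dict.empty PySem.Dict.nodup_keys_empty
  have hUitems : (UD bigger smaller).items.Nodup := by
    have := hnodupKeys
    simp only [PySem.Dict.keys] at this
    exact this.of_map
  have hBpw : ((pvLastPerKey (PySem.List.sorted bigger (fun kv => kv.1) false)).map (gB smaller)).Pairwise
      (fun a b : Int × Int => a.1 < b.1) := by
    rw [List.pairwise_map]
    refine (bb_pairwise_lt bigger).imp ?_
    intro a b h
    rw [gB_eq, gB_eq]
    exact h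
  have hBnodup : ((pvLastPerKey (PySem.List.sorted bigger (fun kv => kv.1) false)).map (gB smaller)).Nodup :=
    hBpw.imp (fun h e => by rw [e] at h; exact lt_irrefl _ h)
  refine PySem.List.sorted_eq_of_perm_of_pairwise_lt _ _ _ ?_ hBpw
  refine (List.perm_ext_iff_of_nodup hBnodup hUitems).mpr ?_
  intro x
  obtain ⟨kk, w⟩ := x
  rw [List.mem_map]
  rw [← PySem.Dict.get?_eq_some_iff_mem_items _ _ _ hnodupKeys]
  rw [UD_get? bigger smaller kk]
  constructor
  · rintro ⟨p, hp, hgp⟩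
    rw [gB_eq] at hgp
    have h1 : p.1 = kk := congrArg Prod.fst hgp
    have h2 : aval smaller p = w := congrArg Prod.snd hgp
    have hlast := (mem_bb bigger p).mp hp
    rw [← h1, hlast]
    simp [h2]
  · intro h
    obtain ⟨p, hp, hv⟩ := Option.map_eq_some_iff.mp h
    have hpmem : p ∈ bigger.filter (fun q => q.1 == kk) := List.mem_of_getLast? hp
    have hpk : p.1 = kk := by simpa using (List.mem_filter.mp hpmem).2
    refine ⟨p, (mem_bb bigger p).mpr ?_, ?_⟩
    · rw [hpk]; exact hp
    · rw [gB_eq, hpk, hv]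


-- ===== VERDICT (by name: the statement is the Claim_ definition above) =====
theorem get_union_spec : Claim_equal_get_union := by
  intro bigger smaller _
  unfold Spec_get_union
  exact main_eq bigger smaller
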